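-- pv_equiv track=rewrite | github.com/AbdallahHussien4/Mazzikaa | StaffLines.py | getMostCommonMinMaxHorizontally
-- ===== SOURCE A (Python) =====
-- def countFrequency(my_list):
--     freq = {}
--     for item in my_list:
--         if (item in freq):
--             freq[item] += 1
--         else:
--             freq[item] = 1
--     return freq
--
-- def getMostCommonMinMaxHorizontally(aList):
--     freq = countFrequency(aList)
--     sortedFreq = sorted(freq.items(), key=lambda x: x[1], reverse=True)
--     mMin = sortedFreq[0][0]
--     mMax = sortedFreq[0][0]
--     ref = sortedFreq[0][0]
--     for i in sortedFreq:
--         diff = abs(i[0] - ref)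
--         if 1 <= ref <= 3:
--             if diff > 3 or i[0] == 0:
--                 continue
--             if(i[0] < mMin):
--                 mMin = i[0]
--             if(i[0] > mMax):
--                 mMax = i[0]
--         elif 4 <= ref <= 15:
--             if diff > int(ref/2):
--                 continue
--             if(i[0] < mMin):
--                 mMin = i[0]
--             if(i[0] > mMax):
--                 mMax = i[0]
--         else:
--             if diff > 10:
--                 continue
--             if(i[0] < mMin):
--                 mMin = i[0]
--             if(i[0] > mMax):
--                 mMax = i[0]
--     return mMin, mMax
-- ===== SOURCE B (Python) =====
-- def getMostCommonMinMaxHorizontally(aList):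
--     counts = {}
--     for x in aList:
--         counts[x] = counts.get(x, 0) + 1
--     ref = None
--     bestc = 0
--     for k, c in counts.items():
--         if c > bestc:
--             ref, bestc = k, c
--     if 1 <= ref <= 3:
--         tol, banZero = 3, True
--     elif 4 <= ref <= 15:
--         tol, banZero = ref // 2, False
--     else:
--         tol, banZero = 10, False
--     mMin = mMax = ref
--     for v in aList:
--         if abs(v - ref) <= tol and not (banZero and v == 0):
--             if v < mMin:
--                 mMin = v
--             if v > mMax:
--                 mMax = v
--     return mMin, mMax
-- ===== Notes on version B (the rewrite author's own statement) =====
-- stated objective: faster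
-- what changed: B drops A's O(n log n) sort of the frequency table: it finds the most-common value (tie = first appearance) in one pass over the counter and then takes the constrained min/max in one pass over the input list itself.
import Mathlib
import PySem

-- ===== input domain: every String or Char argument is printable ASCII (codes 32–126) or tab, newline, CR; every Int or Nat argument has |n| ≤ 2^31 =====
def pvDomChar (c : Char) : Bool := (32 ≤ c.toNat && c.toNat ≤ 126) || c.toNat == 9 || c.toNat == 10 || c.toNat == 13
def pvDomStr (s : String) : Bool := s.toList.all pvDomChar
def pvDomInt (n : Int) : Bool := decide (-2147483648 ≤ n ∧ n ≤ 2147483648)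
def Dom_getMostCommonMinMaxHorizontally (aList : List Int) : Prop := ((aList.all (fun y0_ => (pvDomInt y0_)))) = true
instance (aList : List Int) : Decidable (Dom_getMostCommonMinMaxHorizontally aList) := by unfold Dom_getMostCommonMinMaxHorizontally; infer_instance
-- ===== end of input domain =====

-- B replaces A's sort of the frequency table by a single first-maximum pass over it and then
-- takes the min/max in one pass over the input list itself (objective: faster, O(n log n) → O(n)).

-- ===== PORT A =====
def countFrequency (myList : List Int) : PySem.Dict Int Int :=
  myList.foldl (fun freq item =>
    if freq.contains item then freq.insert item (freq.getD item 0 + 1)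
    else freq.insert item 1) PySem.Dict.empty

def getMostCommonMinMaxHorizontally (aList : List Int) : Int × Int :=
  let freq := countFrequency aList
  let sortedFreq := PySem.List.sorted freq.items (fun x => x.2) true
  match PySem.List.pyGet? sortedFreq 0 with
  | none => (0, 0)          -- sortedFreq[0] raises IndexError (empty aList); excluded by Pre_
  | some h =>
    let ref := h.1
    sortedFreq.foldl (fun (s : Int × Int) i =>
      let diff := |i.1 - ref|
      if 1 ≤ ref ∧ ref ≤ 3 then
        if 3 < diff ∨ i.1 = 0 then s
        else ((if i.1 < s.1 then i.1 else s.1), (if s.2 < i.1 then i.1 else s.2))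
      else if 4 ≤ ref ∧ ref ≤ 15 then
        -- int(ref/2) = ref // 2 exactly, since 4 ≤ ref here
        if PySem.Int.floordiv ref 2 < diff then s
        else ((if i.1 < s.1 then i.1 else s.1), (if s.2 < i.1 then i.1 else s.2))
      else
        if 10 < diff then s
        else ((if i.1 < s.1 then i.1 else s.1), (if s.2 < i.1 then i.1 else s.2))) (h.1, h.1)

-- ===== PORT B =====
def getMostCommonMinMaxHorizontally_alt (aList : List Int) : Int × Int :=
  let counts := aList.foldl (fun d x => d.insert x (d.getD x 0 + 1)) PySem.Dict.empty
  let best := counts.items.foldl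
    (fun (acc : Option Int × Int) kc => if acc.2 < kc.2 then (some kc.1, kc.2) else acc)
    ((none : Option Int), (0 : Int))
  match best.1 with
  | none => (0, 0)          -- ref is still None: Python raises TypeError (empty aList); excluded by Pre_
  | some ref =>
    let tb : Int × Bool :=
      if 1 ≤ ref ∧ ref ≤ 3 then (3, true)
      else if 4 ≤ ref ∧ ref ≤ 15 then (PySem.Int.floordiv ref 2, false)
      else (10, false)
    aList.foldl (fun (s : Int × Int) v =>
      if |v - ref| ≤ tb.1 ∧ ¬(tb.2 = true ∧ v = 0) then
        ((if v < s.1 then v else s.1), (if s.2 < v then v else s.2))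
      else s) (ref, ref)

-- ===== PRECONDITION & SPEC =====
-- Pre_ excludes only the empty list, on which Python A raises IndexError (sortedFreq[0]).
def Pre_getMostCommonMinMaxHorizontally (aList : List Int) : Prop := aList ≠ []
instance (aList : List Int) : Decidable (Pre_getMostCommonMinMaxHorizontally aList) := by unfold Pre_getMostCommonMinMaxHorizontally; infer_instance

def pvWitness_getMostCommonMinMaxHorizontally : List Int := [5, 5, 7]

def Spec_getMostCommonMinMaxHorizontally (aList : List Int) (out : Int × Int) : Prop := out = getMostCommonMinMaxHorizontally_alt aList
instance (aList : List Int) (out : Int × Int) : Decidable (Spec_getMostCommonMinMaxHorizontally aList out) := by unfold Spec_getMostCommonMinMaxHorizontally; infer_instance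

-- ===== CLAIM (what is proved, stated in full; the proofs are below) =====
def Claim_equal_getMostCommonMinMaxHorizontally : Prop := ∀ (aList : List Int), Dom_getMostCommonMinMaxHorizontally aList → Pre_getMostCommonMinMaxHorizontally aList → Spec_getMostCommonMinMaxHorizontally aList (getMostCommonMinMaxHorizontally aList)

-- ===== LEMMAS AND PROOFS =====

-- the admission filter both loops apply, as one Bool predicate of (ref, v)
def pvOk (ref v : Int) : Bool :=
  if 1 ≤ ref ∧ ref ≤ 3 then decide (|v - ref| ≤ 3 ∧ v ≠ 0)
  else if 4 ≤ ref ∧ ref ≤ 15 then decide (|v - ref| ≤ PySem.Int.floordiv ref 2)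
  else decide (|v - ref| ≤ 10)

-- the running first-maximum step on (key, count) pairs
def pvRefStep (p q : Int × Int) : Int × Int := if p.2 < q.2 then q else p

-- min/max accumulation steps filtered by p
def pvMinStep (p : Int → Bool) (m v : Int) : Int := if p v then (if v < m then v else m) else m
def pvMaxStep (p : Int → Bool) (m v : Int) : Int := if p v then (if m < v then v else m) else m

lemma countFrequency_eq (xs : List Int) : countFrequency xs = PySem.Dict.counter xs := by
  unfold countFrequency
  rw [← PySem.Dict.foldl_insert_getD_add_one_eq_counter]
  congr 1
  funext d x
  by_cases h : d.contains x
  · simp [h]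
  · simp [h, PySem.Dict.getD_of_not_contains d 0 (by simpa using h)]

lemma headIns (xs : List (Int × Int)) : ∀ (h : Int × Int) (t : List (Int × Int)),
    (xs.foldl (fun acc x => PySem.List.insertBy (fun a b => decide (b.2 < a.2)) x acc) (h :: t)).head?
      = some (xs.foldl pvRefStep h) := by
  induction xs with
  | nil => intro h t; rfl
  | cons x xs ih =>
    intro h t
    simp only [List.foldl_cons]
    by_cases hc : h.2 < x.2
    · rw [show PySem.List.insertBy (fun a b => decide (b.2 < a.2)) x (h :: t)
            = x :: h :: t by simp [PySem.List.insertBy, hc]]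
      rw [ih x (h :: t)]
      simp [pvRefStep, hc]
    · rw [show PySem.List.insertBy (fun a b => decide (b.2 < a.2)) x (h :: t)
            = h :: PySem.List.insertBy (fun a b => decide (b.2 < a.2)) x t by
          simp [PySem.List.insertBy, hc]]
      rw [ih h _]
      simp [pvRefStep, hc]

lemma foldl_opt (l : List (Int × Int)) : ∀ (p : Int × Int),
    l.foldl (fun (acc : Option Int × Int) kc => if acc.2 < kc.2 then (some kc.1, kc.2) else acc)
        (some p.1, p.2)
      = (some (l.foldl pvRefStep p).1, (l.foldl pvRefStep p).2) := by
  induction l with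
  | nil => intro p; rfl
  | cons x l ih =>
    intro p
    simp only [List.foldl_cons]
    by_cases hc : p.2 < x.2 <;> simp [pvRefStep, hc, ih]

lemma foldl_pair (p : Int → Bool) (l : List Int) : ∀ (a b : Int),
    l.foldl (fun (s : Int × Int) v =>
        if p v then ((if v < s.1 then v else s.1), (if s.2 < v then v else s.2)) else s) (a, b)
      = (l.foldl (pvMinStep p) a, l.foldl (pvMaxStep p) b) := by
  induction l with
  | nil => intro a b; rfl
  | cons v l ih =>
    intro a b
    simp only [List.foldl_cons]
    by_cases hp : p v <;> simp [pvMinStep, pvMaxStep, hp, ih]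

lemma mfold_le (p : Int → Bool) (l : List Int) : ∀ a, l.foldl (pvMinStep p) a ≤ a := by
  induction l with
  | nil => intro a; simp
  | cons v l ih =>
    intro a
    have h2 : pvMinStep p a v ≤ a := by unfold pvMinStep; split_ifs <;> omega
    calc (v :: l).foldl (pvMinStep p) a = l.foldl (pvMinStep p) (pvMinStep p a v) := rfl
      _ ≤ pvMinStep p a v := ih _
      _ ≤ a := h2

lemma mfold_le_mem (p : Int → Bool) (l : List Int) : ∀ a x, x ∈ l → p x → l.foldl (pvMinStep p) a ≤ x := by
  induction l with
  | nil => intro a x hx; simp at hx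
  | cons v l ih =>
    intro a x hx hp
    rcases List.mem_cons.mp hx with rfl | hx
    · calc (x :: l).foldl (pvMinStep p) a = l.foldl (pvMinStep p) (pvMinStep p a x) := rfl
        _ ≤ pvMinStep p a x := mfold_le p l _
        _ ≤ x := by unfold pvMinStep; simp [hp]; split_ifs <;> omega
    · exact ih _ x hx hp

lemma mfold_cases (p : Int → Bool) (l : List Int) : ∀ a,
    l.foldl (pvMinStep p) a = a ∨ ∃ x ∈ l, p x ∧ l.foldl (pvMinStep p) a = x := by
  induction l with
  | nil => intro a; left; rfl
  | cons v l ih =>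
    intro a
    rcases ih (pvMinStep p a v) with h | ⟨x, hx, hp, h⟩
    · by_cases hpv : p v
      · by_cases hlt : v < a
        · right; exact ⟨v, List.mem_cons_self, hpv, by simpa [pvMinStep, hpv, hlt] using h⟩
        · left; simpa [pvMinStep, hpv, hlt] using h
      · left; simpa [pvMinStep, hpv] using h
    · right; exact ⟨x, List.mem_cons_of_mem _ hx, hp, h⟩

lemma mfold_eq (p : Int → Bool) (l₁ l₂ : List Int) (a : Int)
    (hm : ∀ x, x ∈ l₁ ↔ x ∈ l₂) : l₁.foldl (pvMinStep p) a = l₂.foldl (pvMinStep p) a := by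
  have le : ∀ (u v : List Int), (∀ x, x ∈ u ↔ x ∈ v) →
      u.foldl (pvMinStep p) a ≤ v.foldl (pvMinStep p) a := by
    intro u v huv
    rcases mfold_cases p v a with h | ⟨x, hx, hp, h⟩
    · rw [h]; exact mfold_le p u a
    · rw [h]; exact mfold_le_mem p u a x ((huv x).mpr hx) hp
  exact le_antisymm (le l₁ l₂ hm) (le l₂ l₁ fun x => (hm x).symm)

lemma Mfold_ge (p : Int → Bool) (l : List Int) : ∀ a, a ≤ l.foldl (pvMaxStep p) a := by
  induction l with
  | nil => intro a; simp
  | cons v l ih =>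
    intro a
    have h2 : a ≤ pvMaxStep p a v := by unfold pvMaxStep; split_ifs <;> omega
    calc a ≤ pvMaxStep p a v := h2
      _ ≤ l.foldl (pvMaxStep p) (pvMaxStep p a v) := ih _
      _ = (v :: l).foldl (pvMaxStep p) a := rfl

lemma Mfold_ge_mem (p : Int → Bool) (l : List Int) : ∀ a x, x ∈ l → p x → x ≤ l.foldl (pvMaxStep p) a := by
  induction l with
  | nil => intro a x hx; simp at hx
  | cons v l ih =>
    intro a x hx hp
    rcases List.mem_cons.mp hx with rfl | hx
    · calc x ≤ pvMaxStep p a x := by unfold pvMaxStep; simp [hp]; split_ifs <;> omega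
        _ ≤ l.foldl (pvMaxStep p) (pvMaxStep p a x) := Mfold_ge p l _
        _ = (x :: l).foldl (pvMaxStep p) a := rfl
    · exact ih _ x hx hp

lemma Mfold_cases (p : Int → Bool) (l : List Int) : ∀ a,
    l.foldl (pvMaxStep p) a = a ∨ ∃ x ∈ l, p x ∧ l.foldl (pvMaxStep p) a = x := by
  induction l with
  | nil => intro a; left; rfl
  | cons v l ih =>
    intro a
    rcases ih (pvMaxStep p a v) with h | ⟨x, hx, hp, h⟩
    · by_cases hpv : p v
      · by_cases hlt : a < v
        · right; exact ⟨v, List.mem_cons_self, hpv, by simpa [pvMaxStep, hpv, hlt] using h⟩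
        · left; simpa [pvMaxStep, hpv, hlt] using h
      · left; simpa [pvMaxStep, hpv] using h
    · right; exact ⟨x, List.mem_cons_of_mem _ hx, hp, h⟩

lemma Mfold_eq (p : Int → Bool) (l₁ l₂ : List Int) (a : Int)
    (hm : ∀ x, x ∈ l₁ ↔ x ∈ l₂) : l₁.foldl (pvMaxStep p) a = l₂.foldl (pvMaxStep p) a := by
  have ge : ∀ (u v : List Int), (∀ x, x ∈ u ↔ x ∈ v) →
      v.foldl (pvMaxStep p) a ≤ u.foldl (pvMaxStep p) a := by
    intro u v huv
    rcases Mfold_cases p v a with h | ⟨x, hx, hp, h⟩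
    · rw [h]; exact Mfold_ge p u a
    · rw [h]; exact Mfold_ge_mem p u a x ((huv x).mpr hx) hp
  exact le_antisymm (ge l₂ l₁ fun x => (hm x).symm) (ge l₁ l₂ hm)

lemma pyGet?_zero_of_ne_nil (xs : List (Int × Int)) (h : xs ≠ []) :
    PySem.List.pyGet? xs 0 = xs.head? := by
  cases xs with
  | nil => exact absurd rfl h
  | cons x t => simp [PySem.List.pyGet?, PySem.List.pyIdx?]


lemma bodyA_eq (ref : Int) :
    (fun (s : Int × Int) (i : Int × Int) =>
      let diff := |i.1 - ref|
      if 1 ≤ ref ∧ ref ≤ 3 then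
        if 3 < diff ∨ i.1 = 0 then s
        else ((if i.1 < s.1 then i.1 else s.1), (if s.2 < i.1 then i.1 else s.2))
      else if 4 ≤ ref ∧ ref ≤ 15 then
        if PySem.Int.floordiv ref 2 < diff then s
        else ((if i.1 < s.1 then i.1 else s.1), (if s.2 < i.1 then i.1 else s.2))
      else
        if 10 < diff then s
        else ((if i.1 < s.1 then i.1 else s.1), (if s.2 < i.1 then i.1 else s.2)))
    = fun s i =>
      if pvOk ref i.1 then ((if i.1 < s.1 then i.1 else s.1), (if s.2 < i.1 then i.1 else s.2)) else s := by
  funext s i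
  unfold pvOk
  dsimp only
  generalize |i.1 - ref| = d
  by_cases h1 : 1 ≤ ref ∧ ref ≤ 3
  · simp only [if_pos h1, decide_eq_true_eq]
    by_cases hc : 3 < d ∨ i.1 = 0
    · rw [if_pos hc, if_neg (show ¬(d ≤ 3 ∧ i.1 ≠ 0) by omega)]
    · rw [if_neg hc, if_pos (show d ≤ 3 ∧ i.1 ≠ 0 by omega)]
  · by_cases h2 : 4 ≤ ref ∧ ref ≤ 15
    · simp only [if_neg h1, if_pos h2, decide_eq_true_eq]
      by_cases hc : PySem.Int.floordiv ref 2 < d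
      · rw [if_pos hc, if_neg (show ¬(d ≤ PySem.Int.floordiv ref 2) by omega)]
      · rw [if_neg hc, if_pos (show d ≤ PySem.Int.floordiv ref 2 by omega)]
    · simp only [if_neg h1, if_neg h2, decide_eq_true_eq]
      by_cases hc : 10 < d
      · rw [if_pos hc, if_neg (show ¬(d ≤ 10) by omega)]
      · rw [if_neg hc, if_pos (show d ≤ 10 by omega)]

lemma bodyB_eq (ref : Int) (tb : Int × Bool)
    (htb : tb = if 1 ≤ ref ∧ ref ≤ 3 then ((3 : Int), true)
        else if 4 ≤ ref ∧ ref ≤ 15 then (PySem.Int.floordiv ref 2, false)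
        else (10, false)) :
    (fun (s : Int × Int) (v : Int) =>
      if |v - ref| ≤ tb.1 ∧ ¬(tb.2 = true ∧ v = 0) then
        ((if v < s.1 then v else s.1), (if s.2 < v then v else s.2))
      else s)
    = fun s v =>
      if pvOk ref v then ((if v < s.1 then v else s.1), (if s.2 < v then v else s.2)) else s := by
  funext s v
  unfold pvOk
  by_cases h1 : 1 ≤ ref ∧ ref ≤ 3
  · simp only [htb, if_pos h1, decide_eq_true_eq]
    by_cases hc : |v - ref| ≤ 3 ∧ v ≠ 0
    · rw [if_pos (by simpa using hc), if_pos hc]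
    · rw [if_neg (by simpa using hc), if_neg hc]
  · by_cases h2 : 4 ≤ ref ∧ ref ≤ 15
    · simp only [htb, if_neg h1, if_pos h2, decide_eq_true_eq]
      by_cases hc : |v - ref| ≤ PySem.Int.floordiv ref 2
      · rw [if_pos (by simpa using hc), if_pos hc]
      · rw [if_neg (by simpa using hc), if_neg hc]
    · simp only [htb, if_neg h1, if_neg h2, decide_eq_true_eq]
      by_cases hc : |v - ref| ≤ 10
      · rw [if_pos (by simpa using hc), if_pos hc]
      · rw [if_neg (by simpa using hc), if_neg hc]

-- ===== VERDICT (by name: the statement is the Claim_ definition above) =====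
theorem getMostCommonMinMaxHorizontally_spec : Claim_equal_getMostCommonMinMaxHorizontally := by
  intro aList _ hpre
  unfold Spec_getMostCommonMinMaxHorizontally
  have hpre' : aList ≠ [] := hpre
  have hof : PySem.Set.ofList aList ≠ [] := by
    obtain ⟨a0, as, h⟩ := List.exists_cons_of_ne_nil hpre'
    exact List.ne_nil_of_mem ((PySem.Set.mem_ofList aList a0).mpr (h ▸ List.mem_cons_self))
  obtain ⟨k, S, hks⟩ := List.exists_cons_of_ne_nil hof
  have hitems : (PySem.Dict.counter aList).items
      = (k, (List.count k aList : Int)) :: S.map (fun j => (j, (List.count j aList : Int))) := by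
    rw [PySem.Dict.items_counter, hks]; rfl
  set m : Int × Int := (k, (List.count k aList : Int)) with hm
  set rest : List (Int × Int) := S.map (fun j => (j, (List.count j aList : Int))) with hrest
  set F : Int × Int := rest.foldl pvRefStep m with hF
  have hkmem : k ∈ aList := (PySem.Set.mem_ofList aList k).mp (hks ▸ List.mem_cons_self)
  have hkpos : (0 : Int) < (List.count k aList : Int) := by
    exact_mod_cast List.count_pos_iff.mpr hkmem
  -- the sorted frequency list
  have hsne : PySem.List.sorted (PySem.Dict.counter aList).items (fun x => x.2) true ≠ [] := by
    rw [Ne, PySem.List.sorted_eq_nil_iff, hitems]; simp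
  have hhead : (PySem.List.sorted (PySem.Dict.counter aList).items (fun x => x.2) true).head? = some F := by
    rw [PySem.List.sorted_rev_eq_foldl_insertBy, hitems]
    simp only [List.foldl_cons]
    exact headIns rest m []
  have hget : PySem.List.pyGet? (PySem.List.sorted (PySem.Dict.counter aList).items (fun x => x.2) true) 0
      = some F := by rw [pyGet?_zero_of_ne_nil _ hsne, hhead]
  -- membership of the key lists
  have hfst : ((PySem.Dict.counter aList).items).map Prod.fst = PySem.Set.ofList aList := by
    rw [PySem.Dict.items_counter, List.map_map]
    simp [Function.comp_def]
  have hmem : ∀ x, x ∈ (PySem.List.sorted (PySem.Dict.counter aList).items (fun x => x.2) true).map Prod.fst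
      ↔ x ∈ aList := by
    intro x
    have h1 : x ∈ (PySem.List.sorted (PySem.Dict.counter aList).items (fun x => x.2) true).map Prod.fst
        ↔ x ∈ ((PySem.Dict.counter aList).items).map Prod.fst := by
      simp only [List.mem_map, PySem.List.mem_sorted]
    rw [h1, hfst, PySem.Set.mem_ofList]
  -- reduce A
  have hA : getMostCommonMinMaxHorizontally aList
      = (((PySem.List.sorted (PySem.Dict.counter aList).items (fun x => x.2) true).map Prod.fst).foldl
          (pvMinStep (pvOk F.1)) F.1,
         ((PySem.List.sorted (PySem.Dict.counter aList).items (fun x => x.2) true).map Prod.fst).foldl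
          (pvMaxStep (pvOk F.1)) F.1) := by
    unfold getMostCommonMinMaxHorizontally
    rw [countFrequency_eq]
    dsimp only
    rw [hget]
    dsimp only
    rw [bodyA_eq F.1, ← foldl_pair]
    exact (List.foldl_map (f := Prod.fst)
      (g := fun (s : Int × Int) v => if pvOk F.1 v then ((if v < s.1 then v else s.1), (if s.2 < v then v else s.2)) else s)).symm
  -- reduce B
  have hB : getMostCommonMinMaxHorizontally_alt aList
      = (aList.foldl (pvMinStep (pvOk F.1)) F.1, aList.foldl (pvMaxStep (pvOk F.1)) F.1) := by
    unfold getMostCommonMinMaxHorizontally_alt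
    rw [PySem.Dict.foldl_insert_getD_add_one_eq_counter]
    dsimp only
    rw [hitems]
    dsimp only [List.foldl_cons]
    rw [if_pos (show ((none : Option Int), (0 : Int)).2 < (k, (List.count k aList : Int)).2 from hkpos)]
    rw [show ((some (k, (List.count k aList : Int)).1, (k, (List.count k aList : Int)).2) : Option Int × Int)
        = (some m.1, m.2) from rfl]
    rw [foldl_opt rest m]
    dsimp only
    rw [bodyB_eq F.1 _ rfl, foldl_pair]
  rw [hA, hB]
  exact Prod.ext (mfold_eq _ _ _ _ hmem) (Mfold_eq _ _ _ _ hmem)
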